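-- pv_equiv track=rewrite | github.com/coruus/potassium | expad.py | expad_length
-- ===== SOURCE A (Python) =====
-- EXLENGTH = 2050
--
-- def expad_length(length):
--   """Calculate the padded length of a message."""
--   if length < EXLENGTH:
--       return EXLENGTH
--   else:
--       padded_len = EXLENGTH
--       while padded_len <= length:
--           padded_len <<= 1
--       return padded_len
-- ===== SOURCE B (Python) =====
-- EXLENGTH = 2050
--
-- def expad_length(length):
--     """Calculate the padded length of a message."""
--     if length < EXLENGTH:
--         return EXLENGTH
--     c = (length + EXLENGTH) // EXLENGTH
--     return EXLENGTH << (c - 1).bit_length()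
-- ===== Notes on version B (the rewrite author's own statement) =====
-- stated objective: alternative
-- what changed: Replaces the doubling while-loop with a closed form: EXLENGTH shifted left by the bit length of (length + EXLENGTH)//EXLENGTH - 1.
import Mathlib
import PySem

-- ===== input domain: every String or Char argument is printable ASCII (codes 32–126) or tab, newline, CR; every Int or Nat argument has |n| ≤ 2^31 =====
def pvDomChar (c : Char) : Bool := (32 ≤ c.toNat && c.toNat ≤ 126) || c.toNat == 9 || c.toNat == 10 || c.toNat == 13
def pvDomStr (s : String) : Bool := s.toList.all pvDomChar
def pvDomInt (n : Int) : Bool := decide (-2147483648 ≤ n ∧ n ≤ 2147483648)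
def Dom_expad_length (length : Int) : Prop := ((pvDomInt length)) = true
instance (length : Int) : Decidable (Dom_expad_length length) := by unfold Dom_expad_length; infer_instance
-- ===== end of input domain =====

-- B replaces A's doubling loop with a closed form: EXLENGTH shifted left by the bit length
-- of (length + EXLENGTH)//EXLENGTH - 1, computing the same value without a loop.

-- ===== PORT A =====
def pvEXLENGTH : Int := 2050

-- the 'while padded_len <= length: padded_len <<= 1' loop; the 0 < padded_len conjunct is a
-- totality guard only (always true at every call site, padded_len starts at 2050 and doubles)
def expadLoop (padded_len length : Int) : Int :=
  if h : padded_len ≤ length ∧ 0 < padded_len then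
    expadLoop (2 * padded_len) length
  else padded_len
termination_by (length + 1 - padded_len).toNat
decreasing_by omega

def expad_length (length : Int) : Int :=
  if length < pvEXLENGTH then pvEXLENGTH
  else expadLoop pvEXLENGTH length

-- ===== PORT B =====
def expad_length_alt (length : Int) : Int :=
  if length < pvEXLENGTH then pvEXLENGTH
  else
    let c := PySem.Int.floordiv (length + pvEXLENGTH) pvEXLENGTH
    pvEXLENGTH * 2 ^ PySem.Int.bitLength (c - 1)

-- ===== PRECONDITION & SPEC =====
def Spec_expad_length (length : Int) (out : Int) : Prop := out = expad_length_alt length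
instance (length : Int) (out : Int) : Decidable (Spec_expad_length length out) := by unfold Spec_expad_length; infer_instance

-- ===== CLAIM (what is proved, stated in full; the proofs are below) =====
def Claim_equal_expad_length : Prop := ∀ (length : Int), Dom_expad_length length → Spec_expad_length length (expad_length length)

-- ===== LEMMAS AND PROOFS =====

-- the loop returns q whenever q is a p·2^k with length < q and (q = p or q ≤ 2·length)
theorem expadLoop_eq (len : Int) (k : Nat) : ∀ (p q : Int), 0 < p → q = p * 2 ^ k →
    len < q → (q = p ∨ q ≤ 2 * len) → expadLoop p len = q := by
  induction k with
  | zero =>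
    intro p q hp hq hlt _
    simp at hq
    rw [expadLoop, dif_neg (by omega)]
    omega
  | succ k ih =>
    intro p q hp hq hlt hor
    rw [expadLoop]
    by_cases hle : p ≤ len
    · rw [dif_pos ⟨hle, hp⟩]
      apply ih (2 * p) q (by omega)
      · rw [hq, pow_succ]; ring
      · exact hlt
      · rcases hor with h | h
        · left; nlinarith [pow_pos (by norm_num : (0:Int) < 2) k]
        · right; exact h
    · rw [dif_neg (by omega)]
      rcases hor with h | h
      · omega
      · exfalso
        have h2 : p * 2 ^ (k+1) ≤ 2 * len := hq ▸ h
        have hk : (2:Int) ≤ 2 ^ (k+1) := by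
          calc (2:Int) = 2 ^ 1 := by norm_num
          _ ≤ 2 ^ (k+1) := by
            apply pow_le_pow_right₀ (by norm_num) (by omega)
        nlinarith

theorem expad_length_spec : Claim_equal_expad_length := by
  unfold Claim_equal_expad_length Spec_expad_length
  intro length _
  unfold expad_length expad_length_alt
  by_cases hlt : length < pvEXLENGTH
  · simp [hlt]
  · rw [if_neg hlt, if_neg hlt]
    have hE : pvEXLENGTH = (2050 : Int) := rfl
    have hlen : (2050:Int) ≤ length := by rw [hE] at hlt; omega
    -- c - 1 = ⌊length / 2050⌋ as a natural number m ≥ 1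
    set c := PySem.Int.floordiv (length + pvEXLENGTH) pvEXLENGTH with hc
    have hcd : c = (length + 2050) / 2050 := by
      rw [hc, hE]; exact PySem.Int.floordiv_eq_ediv_of_pos (by norm_num)
    set m : Nat := (c - 1).toNat with hm
    have hc2 : 2 ≤ c := by rw [hcd]; omega
    have hcm : c - 1 = (m : Int) := by omega
    have hm1 : 1 ≤ m := by omega
    -- division brackets: 2050 * m ≤ length < 2050 * (m + 1)
    have hml : 2050 * (m : Int) ≤ length ∧ length < 2050 * ((m : Int) + 1) := by
      have := Int.mul_ediv_add_emod (length + 2050) 2050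
      have h1 : 0 ≤ (length + 2050) % 2050 := Int.emod_nonneg _ (by norm_num)
      have h2 : (length + 2050) % 2050 < 2050 := Int.emod_lt_of_pos _ (by norm_num)
      omega
    set b : Nat := PySem.Int.bitLength (c - 1) with hb
    -- bit-length brackets: 2^(b-1) ≤ m < 2^b
    have hub : m < 2 ^ b := by
      have h := PySem.Int.lt_two_pow_bitLength (c - 1)
      rw [hcm, Int.natAbs_natCast] at h
      rwa [hb, hcm]
    have hlb : 2 ^ (b - 1) ≤ m := by
      have h := PySem.Int.two_pow_bitLength_le (c - 1) (by omega)
      rw [hcm, Int.natAbs_natCast] at h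
      rwa [hb, hcm]
    have hb1 : 1 ≤ b := by
      by_contra h
      interval_cases b; omega
    apply expadLoop_eq length b pvEXLENGTH _ (by rw [hE]; norm_num) rfl
    · -- length < 2050 * 2^b
      rw [hE]
      have : ((m:Int) + 1) ≤ (2:Int) ^ b := by exact_mod_cast hub
      nlinarith [hml.2]
    · -- 2050 * 2^b ≤ 2 * length
      right
      rw [hE]
      have hsplit : (2:Int) ^ b = 2 * 2 ^ (b - 1) := by
        rw [← pow_succ']
        congr 1
        omega
      have : ((2:Nat) ^ (b-1) : Int) ≤ (m : Int) := by exact_mod_cast hlb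
      push_cast at this
      nlinarith [hml.1]
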